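-- pv_equiv track=rewrite | github.com/roahoki/monkey-recsys | Tools.py | split_dialogues
-- ===== SOURCE A (Python) =====
-- def split_dialogues(text):
--     dialogues = []
--     current_number = None
--     current_dialogue = ''
--
--     lines = text.split('\n')
--
--     for line in lines:
--         if line.isdigit():
--             if current_number is not None:
--                 dialogues.append((current_number, current_dialogue.strip()))
--                 current_dialogue = ''
--             current_number = line
--         else:
--             current_dialogue += line + '\n'
--
--     if current_number is not None and current_dialogue.strip():
--         dialogues.append((current_number, current_dialogue.strip()))
--
--     return dialogues
-- ===== SOURCE B (Python) =====
-- def split_dialogues(text):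
--     lines = text.split('\n')
--     out = []
--     i = 0
--     while i < len(lines) and not lines[i].isdigit():
--         i += 1          # lines before the first number line belong to no dialogue
--     while i < len(lines):
--         j = i + 1
--         while j < len(lines) and not lines[j].isdigit():
--             j += 1
--         out.append((lines[i], '\n'.join(lines[i + 1:j]).strip()))
--         i = j
--     if out and not out[-1][1]:
--         out.pop()       # a trailing number with no dialogue
--     return out
-- ===== Notes on version B (the rewrite author's own statement) =====
-- stated objective: alternative
-- what changed: A threads one mutable accumulator (current_number, growing current_dialogue string) through a single line loop; B scans for number-line positions and extracts each dialogue as the span of lines between consecutive number lines, dropping a trailing number with no dialogue at the end.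
-- intended difference: On texts whose lines before the first all-digit line contain non-whitespace content, A prepends that stray leading text to the first dialogue (leftover accumulator state), while B skips it; lines before any number belong to no dialogue, so B's value is the intended one. — e.g. on split_dialogues("a\n1\nb"): A returns [("1", "a\nb")], B returns [("1", "b")]
import Mathlib
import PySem

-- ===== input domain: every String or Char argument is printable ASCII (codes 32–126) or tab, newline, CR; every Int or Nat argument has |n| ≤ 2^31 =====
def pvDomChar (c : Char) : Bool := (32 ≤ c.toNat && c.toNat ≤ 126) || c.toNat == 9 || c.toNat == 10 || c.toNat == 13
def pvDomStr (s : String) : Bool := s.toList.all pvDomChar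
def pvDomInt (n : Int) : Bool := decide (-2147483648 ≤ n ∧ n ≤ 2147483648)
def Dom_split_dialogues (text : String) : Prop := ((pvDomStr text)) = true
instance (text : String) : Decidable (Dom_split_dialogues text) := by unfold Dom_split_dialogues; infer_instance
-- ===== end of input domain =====

-- B extracts each dialogue as the span of lines between consecutive number lines instead of A's
-- single mutable accumulator; on texts with stray content before the first number line the two
-- differ (see D_ below), elsewhere they agree.

-- ===== PORT A =====
-- Strings are handled as List Char (the PySem.Chars exact model); pairs become String at the end.
-- aLoop is A's 'for line in lines' loop over the state (dialogues, current_number, current_dialogue),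
-- its [] case is the trailing 'if current_number is not None and current_dialogue.strip()' append.
def aLoop : List (List Char) → List (List Char × List Char) → Option (List Char) → List Char →
    List (List Char × List Char)
  | [], acc, cur, dia =>
      match cur with
      | some n => if PySem.Chars.strip dia ≠ [] then acc ++ [(n, PySem.Chars.strip dia)] else acc
      | none => acc
  | l :: ls, acc, cur, dia =>
      if PySem.Chars.strIsdigit l then
        match cur with
        | some n => aLoop ls (acc ++ [(n, PySem.Chars.strip dia)]) (some l) []
        | none => aLoop ls acc (some l) dia
      else
        aLoop ls acc cur (dia ++ l ++ ['\n'])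

def split_dialogues (text : String) : List (String × String) :=
  (aLoop (PySem.Chars.splitOn text.toList ['\n']) [] none []).map
    (fun p => (String.mk p.1, String.mk p.2))

-- ===== PORT B =====
-- Source B's second while loop: each iteration emits one (number, dialogue) pair; its inner
-- 'while j < len(lines)' scan for the next number line is the takeWhile/dropWhile split.
def bGo (num : List Char) (rest : List (List Char)) : List (List Char × List Char) :=
  (num, PySem.Chars.strip (PySem.Chars.join ['\n']
      (rest.takeWhile (fun l => !PySem.Chars.strIsdigit l)))) ::
    match h : rest.dropWhile (fun l => !PySem.Chars.strIsdigit l) with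
    | [] => []
    | n2 :: rs => bGo n2 rs
  termination_by rest.length
  decreasing_by
    have h1 : (rest.dropWhile (fun l => !PySem.Chars.strIsdigit l)).length ≤ rest.length :=
      List.length_dropWhile_le _ _
    rw [h] at h1; simp at h1; omega

-- Source B's final "if out and not out[-1][1]: out.pop()"
def popTrailingEmpty (out : List (List Char × List Char)) : List (List Char × List Char) :=
  match out.getLast? with
  | some p => if p.2 = [] then out.dropLast else out
  | none => out

-- Source B's first while loop skips the lines before the first number line (dropWhile).
def split_dialogues_alt (text : String) : List (String × String) :=
  (popTrailingEmpty
      (match (PySem.Chars.splitOn text.toList ['\n']).dropWhile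
          (fun l => !PySem.Chars.strIsdigit l) with
        | [] => []
        | n :: rest => bGo n rest)).map (fun p => (String.mk p.1, String.mk p.2))

-- ===== PRECONDITION & SPEC =====
-- On texts in which a line with non-whitespace content precedes the first all-digit line, A
-- prepends that stray leading text to the first dialogue (leftover accumulator state), while B
-- skips it; lines before any number belong to no dialogue, so B's value is the intended one.
def D_split_dialogues (text : String) : Prop :=
  let L := PySem.Chars.splitOn text.toList ['\n']
  let i := L.findIdx PySem.Chars.strIsdigit
  i < L.length ∧ (L.take i).any (fun l => l.any (fun c => !PySem.Chars.isspace c)) = true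
instance (text : String) : Decidable (D_split_dialogues text) := by
  unfold D_split_dialogues; infer_instance

def Spec_split_dialogues (text : String) (out : List (String × String)) : Prop :=
  ¬ D_split_dialogues text → out = split_dialogues_alt text
instance (text : String) (out : List (String × String)) : Decidable (Spec_split_dialogues text out) := by
  unfold Spec_split_dialogues; infer_instance

def pvDiffWitness_split_dialogues : String := "a\n1\nb"
def pvDiffWitnessOut_split_dialogues : (List (String × String)) × (List (String × String)) :=
  ([("1", "a\nb")], [("1", "b")])

-- ===== CLAIM (what is proved, stated in full; the proofs are below) =====
def Claim_unchanged_split_dialogues : Prop :=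
  ∀ (text : String), Dom_split_dialogues text → Spec_split_dialogues text (split_dialogues text)
def Claim_changed_split_dialogues : Prop :=
  Dom_split_dialogues (pvDiffWitness_split_dialogues) ∧
  D_split_dialogues (pvDiffWitness_split_dialogues) ∧
  split_dialogues (pvDiffWitness_split_dialogues) = pvDiffWitnessOut_split_dialogues.1 ∧
  split_dialogues_alt (pvDiffWitness_split_dialogues) = pvDiffWitnessOut_split_dialogues.2 ∧
  pvDiffWitnessOut_split_dialogues.1 ≠ pvDiffWitnessOut_split_dialogues.2

def Claim_exact_split_dialogues : Prop :=
  ∀ (text : String), Dom_split_dialogues text → D_split_dialogues text →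
    split_dialogues text ≠ split_dialogues_alt text

-- ===== LEMMAS AND PROOFS =====

-- aGo characterises what A's loop appends from the first number line on: the block between two
-- number lines, with `pre` (A's leftover current_dialogue lines) folded into the first block, and
-- the last block kept only if non-empty.
def aGo (num : List Char) (pre : List (List Char)) (rest : List (List Char)) :
    List (List Char × List Char) :=
  let body := pre ++ rest.takeWhile (fun l => !PySem.Chars.strIsdigit l)
  let block := PySem.Chars.strip (PySem.Chars.join ['\n'] body)
  match h : rest.dropWhile (fun l => !PySem.Chars.strIsdigit l) with
  | [] => if block ≠ [] then [(num, block)] else []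
  | n2 :: rs => (num, block) :: aGo n2 [] rs
  termination_by rest.length
  decreasing_by
    have h1 : (rest.dropWhile (fun l => !PySem.Chars.strIsdigit l)).length ≤ rest.length :=
      List.length_dropWhile_le _ _
    rw [h] at h1; simp at h1; omega

-- jl is the shape A's current_dialogue always has: each collected line followed by '\n'
def jl (bodies : List (List Char)) : List Char := (bodies.map (· ++ ['\n'])).flatten

theorem rstrip_append_nl (x : List Char) :
    PySem.Chars.rstrip (x ++ ['\n']) = PySem.Chars.rstrip x := by
  simp [PySem.Chars.rstrip, PySem.Chars.isspace]

theorem strip_append_nl (x : List Char) : PySem.Chars.strip (x ++ ['\n']) = PySem.Chars.strip x := by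
  unfold PySem.Chars.strip
  by_cases h : PySem.Chars.lstrip x = []
  · have h2 : PySem.Chars.lstrip (x ++ ['\n']) = [] := by
      simp only [PySem.Chars.lstrip] at h ⊢
      simp [List.dropWhile_append, h, List.dropWhile, PySem.Chars.isspace]
    rw [h2, h]
  · have h2 : PySem.Chars.lstrip (x ++ ['\n']) = PySem.Chars.lstrip x ++ ['\n'] := by
      simp only [PySem.Chars.lstrip] at h ⊢
      simp [List.dropWhile_append, h]
    rw [h2, rstrip_append_nl]

theorem jl_join (bodies : List (List Char)) (h : bodies ≠ []) :
    jl bodies = PySem.Chars.join ['\n'] bodies ++ ['\n'] := by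
  induction bodies with
  | nil => exact absurd rfl h
  | cons a rest ih =>
    rcases rest with _ | ⟨b, rs⟩
    · simp [jl, PySem.Chars.join, List.intercalate]
    · rw [PySem.Chars.join_cons_cons]
      have : jl (a :: b :: rs) = a ++ ['\n'] ++ jl (b :: rs) := by simp [jl]
      rw [this, ih (by simp)]
      simp

theorem strip_jl (bodies : List (List Char)) :
    PySem.Chars.strip (jl bodies) = PySem.Chars.strip (PySem.Chars.join ['\n'] bodies) := by
  rcases h : bodies with _ | ⟨a, rs⟩
  · simp [jl, PySem.Chars.join, List.intercalate]
  · rw [jl_join _ (by simp), strip_append_nl]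

theorem aGo_eq_nil (num : List Char) (pre rest : List (List Char))
    (hdw : rest.dropWhile (fun l => !PySem.Chars.strIsdigit l) = []) :
    aGo num pre rest =
      if PySem.Chars.strip (PySem.Chars.join ['\n']
            (pre ++ rest.takeWhile (fun l => !PySem.Chars.strIsdigit l))) ≠ [] then
        [(num, PySem.Chars.strip (PySem.Chars.join ['\n']
            (pre ++ rest.takeWhile (fun l => !PySem.Chars.strIsdigit l))))]
      else [] := by
  rw [aGo.eq_def]
  split <;> rename_i h1 <;> rw [hdw] at h1 <;>
    first | rfl | exact absurd h1 (by simp)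

theorem aGo_eq_cons (num n2 : List Char) (pre rest rs : List (List Char))
    (hdw : rest.dropWhile (fun l => !PySem.Chars.strIsdigit l) = n2 :: rs) :
    aGo num pre rest =
      (num, PySem.Chars.strip (PySem.Chars.join ['\n']
        (pre ++ rest.takeWhile (fun l => !PySem.Chars.strIsdigit l)))) :: aGo n2 [] rs := by
  rw [aGo.eq_def]
  split <;> rename_i h1 <;> rw [hdw] at h1 <;>
    first | (injection h1 with e1 e2; subst e1; subst e2; rfl) | exact absurd h1 (by simp)

theorem aGo_cons_not (num l : List Char) (pre : List (List Char)) (ls : List (List Char))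
    (h : PySem.Chars.strIsdigit l = false) :
    aGo num pre (l :: ls) = aGo num (pre ++ [l]) ls := by
  have key : List.dropWhile (fun l => !PySem.Chars.strIsdigit l) (l :: ls)
      = List.dropWhile (fun l => !PySem.Chars.strIsdigit l) ls := by simp [h]
  have keyt : (l :: ls).takeWhile (fun l => !PySem.Chars.strIsdigit l)
      = l :: ls.takeWhile (fun l => !PySem.Chars.strIsdigit l) := by simp [h]
  cases hdw : List.dropWhile (fun l => !PySem.Chars.strIsdigit l) ls with
  | nil =>
    rw [aGo_eq_nil _ _ _ (key.trans hdw), aGo_eq_nil _ _ _ hdw, keyt]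
    simp
  | cons n2 rs =>
    rw [aGo_eq_cons _ _ _ _ _ (key.trans hdw), aGo_eq_cons _ _ _ _ _ hdw, keyt]
    simp

theorem aLoop_some (ls : List (List Char)) :
    ∀ (acc : List (List Char × List Char)) (num : List Char) (pre : List (List Char)),
      aLoop ls acc (some num) (jl pre) = acc ++ aGo num pre ls := by
  induction ls with
  | nil =>
    intro acc num pre
    rw [aGo_eq_nil _ _ _ (by simp)]
    simp only [aLoop, List.takeWhile_nil, List.append_nil]
    rw [← strip_jl]
    split_ifs with hs <;> simp
  | cons l ls ih =>
    intro acc num pre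
    cases hd : PySem.Chars.strIsdigit l
    · have h1 : jl pre ++ l ++ ['\n'] = jl (pre ++ [l]) := by simp [jl]
      have h2 : aLoop (l :: ls) acc (some num) (jl pre)
          = aLoop ls acc (some num) (jl (pre ++ [l])) := by
        simp [aLoop, hd, h1]
      rw [h2, ih, ← aGo_cons_not num l pre ls hd]
    · have h2 : aLoop (l :: ls) acc (some num) (jl pre)
          = aLoop ls (acc ++ [(num, PySem.Chars.strip (jl pre))]) (some l) (jl []) := by
        simp [aLoop, hd, jl]
      rw [h2, ih, aGo_eq_cons num l pre (l :: ls) ls (by simp [hd])]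
      have ht : (l :: ls).takeWhile (fun l => !PySem.Chars.strIsdigit l) = [] := by simp [hd]
      simp [ht, strip_jl]

theorem aLoop_none (ls : List (List Char)) :
    ∀ (acc : List (List Char × List Char)) (pre : List (List Char)),
      aLoop ls acc none (jl pre) =
        acc ++ (match ls.dropWhile (fun l => !PySem.Chars.strIsdigit l) with
                | [] => []
                | n :: rest => aGo n (pre ++ ls.takeWhile (fun l => !PySem.Chars.strIsdigit l)) rest) := by
  induction ls with
  | nil => intro acc pre; simp [aLoop]
  | cons l ls ih =>
    intro acc pre
    cases hd : PySem.Chars.strIsdigit l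
    · have h1 : jl pre ++ l ++ ['\n'] = jl (pre ++ [l]) := by simp [jl]
      have h2 : aLoop (l :: ls) acc none (jl pre) = aLoop ls acc none (jl (pre ++ [l])) := by
        simp [aLoop, hd, h1]
      rw [h2, ih]
      simp [hd, List.append_assoc]
    · have h2 : aLoop (l :: ls) acc none (jl pre) = aLoop ls acc (some l) (jl pre) := by
        simp [aLoop, hd]
      rw [h2, aLoop_some]
      simp [hd]

-- B-side facts
theorem bGo_eq_nil (num : List Char) (rest : List (List Char))
    (hdw : rest.dropWhile (fun l => !PySem.Chars.strIsdigit l) = []) :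
    bGo num rest = [(num, PySem.Chars.strip (PySem.Chars.join ['\n']
        (rest.takeWhile (fun l => !PySem.Chars.strIsdigit l))))] := by
  rw [bGo.eq_def]
  split <;> rename_i h1 <;> rw [hdw] at h1 <;>
    first | rfl | exact absurd h1 (by simp)

theorem bGo_eq_cons (num n2 : List Char) (rest rs : List (List Char))
    (hdw : rest.dropWhile (fun l => !PySem.Chars.strIsdigit l) = n2 :: rs) :
    bGo num rest = (num, PySem.Chars.strip (PySem.Chars.join ['\n']
        (rest.takeWhile (fun l => !PySem.Chars.strIsdigit l)))) :: bGo n2 rs := by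
  rw [bGo.eq_def]
  split <;> rename_i h1 <;> rw [hdw] at h1 <;>
    first | (injection h1 with e1 e2; subst e1; subst e2; rfl) | exact absurd h1 (by simp)

theorem bGo_ne_nil (num : List Char) (rest : List (List Char)) : bGo num rest ≠ [] := by
  rw [bGo.eq_def]; simp

theorem popTrailingEmpty_cons (x : List Char × List Char) (l : List (List Char × List Char))
    (h : l ≠ []) : popTrailingEmpty (x :: l) = x :: popTrailingEmpty l := by
  obtain ⟨y, ys, rfl⟩ := List.exists_cons_of_ne_nil h
  rcases hgl : (y :: ys).getLast? with _ | p
  · simp at hgl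
  · simp only [popTrailingEmpty, List.getLast?_cons_cons, hgl]
    split <;> simp

-- whitespace-prefix facts
theorem strip_nil_all_space (w : List Char) (h : PySem.Chars.strip w = []) :
    ∀ c ∈ w, PySem.Chars.isspace c = true := by
  intro c hc
  rw [← List.takeWhile_append_dropWhile (p := PySem.Chars.isspace) (l := w)] at hc
  rcases List.mem_append.mp hc with h1 | h1
  · exact List.mem_takeWhile_imp h1
  · have h2 : List.dropWhile PySem.Chars.isspace
        (List.dropWhile PySem.Chars.isspace w).reverse = [] := by
      have := congrArg List.reverse h
      simpa [PySem.Chars.strip, PySem.Chars.rstrip, PySem.Chars.lstrip] using this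
    rw [List.dropWhile_eq_nil_iff] at h2
    exact h2 c (by simpa using h1)

theorem all_space_strip_nil (w : List Char) (h : ∀ c ∈ w, PySem.Chars.isspace c = true) :
    PySem.Chars.strip w = [] := by
  have hl : PySem.Chars.lstrip w = [] := by
    simp only [PySem.Chars.lstrip, List.dropWhile_eq_nil_iff]; exact h
  simp [PySem.Chars.strip, hl, PySem.Chars.rstrip]

theorem strip_ws_prefix (w x : List Char) (h : ∀ c ∈ w, PySem.Chars.isspace c = true) :
    PySem.Chars.strip (w ++ x) = PySem.Chars.strip x := by
  have hw : List.dropWhile PySem.Chars.isspace w = [] := by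
    rw [List.dropWhile_eq_nil_iff]; exact h
  have : PySem.Chars.lstrip (w ++ x) = PySem.Chars.lstrip x := by
    simp only [PySem.Chars.lstrip]
    rw [List.dropWhile_append, hw]; simp
  simp [PySem.Chars.strip, this]

-- if the stray prefix strips to nothing, prepending it to a block does not change the block
theorem strip_join_ws_prefix (pre b : List (List Char))
    (h : PySem.Chars.strip (PySem.Chars.join ['\n'] pre) = []) :
    PySem.Chars.strip (PySem.Chars.join ['\n'] (pre ++ b)) =
      PySem.Chars.strip (PySem.Chars.join ['\n'] b) := by
  induction pre generalizing b with
  | nil => simp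
  | cons a pre' ih =>
    rcases hpb : pre' ++ b with _ | ⟨c, l⟩
    · obtain ⟨hp, hb⟩ := List.append_eq_nil_iff.mp hpb
      subst hp; subst hb
      simpa [PySem.Chars.join, List.intercalate] using h
    · have hall := strip_nil_all_space _ h
      have ha : ∀ ch ∈ a ++ ['\n'], PySem.Chars.isspace ch = true := by
        intro ch hm
        rcases List.mem_append.mp hm with hm | hm
        · refine hall ch ?_
          rcases pre' with _ | ⟨d, ds⟩
          · simpa [PySem.Chars.join, List.intercalate] using hm
          · rw [PySem.Chars.join_cons_cons]; simp [hm]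
        · simp at hm; subst hm; decide
      have hpre' : PySem.Chars.strip (PySem.Chars.join ['\n'] pre') = [] := by
        rcases pre' with _ | ⟨d, ds⟩
        · simp [PySem.Chars.join, List.intercalate, PySem.Chars.strip,
            PySem.Chars.lstrip, PySem.Chars.rstrip]
        · refine all_space_strip_nil _ ?_
          intro ch hm
          refine hall ch ?_
          rw [PySem.Chars.join_cons_cons]; simp [hm]
      have hcons : PySem.Chars.join ['\n'] ((a :: pre') ++ b)
          = (a ++ ['\n']) ++ PySem.Chars.join ['\n'] (pre' ++ b) := by
        rw [List.cons_append, hpb, PySem.Chars.join_cons_cons, ← hpb]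
      rw [hcons, strip_ws_prefix _ _ ha, ih _ hpre']

-- every character of a '\n'-join is the separator or a character of one of the parts
theorem mem_join_cases (L : List (List Char)) (c : Char)
    (hc : c ∈ PySem.Chars.join ['\n'] L) : c = '\n' ∨ ∃ l ∈ L, c ∈ l := by
  induction L with
  | nil => simp [PySem.Chars.join, List.intercalate] at hc
  | cons a L ih =>
    rcases L with _ | ⟨b, M⟩
    · simp [PySem.Chars.join, List.intercalate] at hc
      exact Or.inr ⟨a, by simp, hc⟩
    · rw [PySem.Chars.join_cons_cons] at hc
      rcases List.mem_append.mp hc with h | h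
      · rcases List.mem_append.mp h with h | h
        · exact Or.inr ⟨a, by simp, h⟩
        · simp at h; exact Or.inl h
      · rcases ih h with h | ⟨l, hl, hcl⟩
        · exact Or.inl h
        · exact Or.inr ⟨l, by simp [hl], hcl⟩

-- if the lines before the first number line do not all strip to nothing, D_ holds
theorem take_findIdx_eq_takeWhile {α : Type} (p : α → Bool) (l : List α) :
    l.take (l.findIdx p) = l.takeWhile (fun x => !p x) := by
  induction l with
  | nil => simp
  | cons a l ih =>
    by_cases h : p a
    · simp [List.findIdx_cons, h]
    · simp only [List.findIdx_cons, h, cond_false, List.takeWhile_cons]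
      simp [h, ih]

-- if the lines before the first number line do not all strip to nothing, D_ holds
theorem D_of_strip_ne (text : String)
    (hdw : (PySem.Chars.splitOn text.toList ['\n']).dropWhile
        (fun l => !PySem.Chars.strIsdigit l) ≠ [])
    (hs : PySem.Chars.strip (PySem.Chars.join ['\n']
        ((PySem.Chars.splitOn text.toList ['\n']).takeWhile
          (fun l => !PySem.Chars.strIsdigit l))) ≠ []) :
    D_split_dialogues text := by
  unfold D_split_dialogues
  set lines := PySem.Chars.splitOn text.toList ['\n'] with hlines
  set p : List Char → Bool := fun l => !PySem.Chars.strIsdigit l with hp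
  have hex : ∃ c ∈ PySem.Chars.join ['\n'] (lines.takeWhile p),
      PySem.Chars.isspace c = false := by
    by_contra hno
    push_neg at hno
    exact hs (all_space_strip_nil _ (fun c hc => by
      have := hno c hc; revert this; cases PySem.Chars.isspace c <;> simp))
  obtain ⟨c, hcmem, hcns⟩ := hex
  rcases mem_join_cases _ _ hcmem with rfl | ⟨l, hl, hcl⟩
  · exact absurd hcns (by decide)
  refine ⟨?_, ?_⟩
  · rw [List.findIdx_lt_length]
    have h2 := mt List.dropWhile_eq_nil_iff.mpr hdw
    push_neg at h2
    obtain ⟨x, hx, hpx⟩ := h2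
    refine ⟨x, hx, ?_⟩
    simp [hp] at hpx
    exact hpx
  · rw [take_findIdx_eq_takeWhile]
    exact List.any_eq_true.mpr ⟨l, hl, List.any_eq_true.mpr ⟨c, hcl, by simp [hcns]⟩⟩

-- the main bridge: A's tail (with whitespace-only carry) is B's tail with a trailing empty pop
theorem aGo_eq_popB : ∀ (k : Nat) (rest : List (List Char)), rest.length ≤ k →
    ∀ (num : List Char) (pre : List (List Char)),
      PySem.Chars.strip (PySem.Chars.join ['\n'] pre) = [] →
      aGo num pre rest = popTrailingEmpty (bGo num rest) := by
  intro k
  induction k with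
  | zero =>
    intro rest hlen num pre hws
    have hr : rest = [] := by cases rest with
      | nil => rfl
      | cons x xs => simp at hlen
    subst hr
    rw [aGo_eq_nil _ _ _ (by simp), bGo_eq_nil _ _ (by simp)]
    simp only [List.takeWhile_nil, List.append_nil]
    rw [hws, show PySem.Chars.strip (PySem.Chars.join ['\n'] ([] : List (List Char))) = []
      from by decide]
    simp [popTrailingEmpty]
  | succ k ih =>
    intro rest hlen num pre hws
    cases hdw : rest.dropWhile (fun l => !PySem.Chars.strIsdigit l) with
    | nil =>
      rw [aGo_eq_nil _ _ _ hdw, bGo_eq_nil _ _ hdw, strip_join_ws_prefix _ _ hws]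
      by_cases hb : PySem.Chars.strip (PySem.Chars.join ['\n']
          (rest.takeWhile (fun l => !PySem.Chars.strIsdigit l))) = [] <;>
        simp [popTrailingEmpty, hb]
    | cons n2 rs =>
      rw [aGo_eq_cons _ _ _ _ _ hdw, bGo_eq_cons _ _ _ _ hdw, strip_join_ws_prefix _ _ hws,
        popTrailingEmpty_cons _ _ (bGo_ne_nil _ _)]
      have hlt : rs.length ≤ k := by
        have h1 := List.length_dropWhile_le (fun l => !PySem.Chars.strIsdigit l) rest
        rw [hdw] at h1; simp at h1; omega
      rw [ih rs hlt n2 [] (by decide)]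

-- ===== TIGHTNESS: inside D_ the two programs always differ (length argument on the first block) =====
theorem mem_join_of_mem (L : List (List Char)) (l : List Char) (c : Char)
    (hl : l ∈ L) (hc : c ∈ l) : c ∈ PySem.Chars.join ['\n'] L := by
  induction L with
  | nil => simp at hl
  | cons a L ih =>
    rcases L with _ | ⟨b, M⟩
    · simp at hl; subst hl; simpa [PySem.Chars.join, List.intercalate] using hc
    · rw [PySem.Chars.join_cons_cons]
      rcases List.mem_cons.mp hl with rfl | hl2
      · exact List.mem_append.mpr (Or.inl (List.mem_append.mpr (Or.inl hc)))
      · exact List.mem_append.mpr (Or.inr (ih hl2))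

theorem lstrip_exists_head (s : List Char) (h : PySem.Chars.strip s ≠ []) :
    ∃ c u, PySem.Chars.lstrip s = c :: u ∧ PySem.Chars.isspace c = false := by
  have hl : PySem.Chars.lstrip s ≠ [] := by
    intro he; exact h (by simp [PySem.Chars.strip, he, PySem.Chars.rstrip])
  obtain ⟨c, u, hc⟩ := List.exists_cons_of_ne_nil hl
  refine ⟨c, u, hc, ?_⟩
  have h2 := List.head_dropWhile_not PySem.Chars.isspace
    (l := s) (by simpa [PySem.Chars.lstrip] using hl)
  simp only [PySem.Chars.lstrip] at hc
  simp only [hc, List.head_cons] at h2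
  exact h2

theorem rstrip_cons_false (c : Char) (y : List Char) (hc : PySem.Chars.isspace c = false) :
    PySem.Chars.rstrip (c :: y) = c :: PySem.Chars.rstrip y := by
  simp only [PySem.Chars.rstrip, List.reverse_cons]
  rw [List.dropWhile_append]
  by_cases h : List.dropWhile PySem.Chars.isspace y.reverse = []
  · simp [h, List.dropWhile, hc]
  · simp [h]

theorem rstrip_append_ne (x t : List Char) (h : PySem.Chars.rstrip t ≠ []) :
    PySem.Chars.rstrip (x ++ t) = x ++ PySem.Chars.rstrip t := by
  simp only [PySem.Chars.rstrip, List.reverse_append]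
  rw [List.dropWhile_append]
  have h2 : List.dropWhile PySem.Chars.isspace t.reverse ≠ [] := by
    intro he; exact h (by simp [PySem.Chars.rstrip, he])
  simp [h2]

theorem strip_len_le_rstrip (t : List Char) :
    (PySem.Chars.strip t).length ≤ (PySem.Chars.rstrip t).length := by
  by_cases h : PySem.Chars.strip t = []
  · simp [h]
  · have hr : PySem.Chars.rstrip (PySem.Chars.lstrip t) ≠ [] := h
    have ht : List.takeWhile PySem.Chars.isspace t ++ PySem.Chars.lstrip t = t := by
      simp [PySem.Chars.lstrip, List.takeWhile_append_dropWhile]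
    have he := rstrip_append_ne (List.takeWhile PySem.Chars.isspace t) (PySem.Chars.lstrip t) hr
    rw [ht] at he
    rw [he, List.length_append]
    show (PySem.Chars.rstrip (PySem.Chars.lstrip t)).length ≤ _
    omega

theorem strip_len_lt (s t : List Char) (h : PySem.Chars.strip s ≠ []) :
    (PySem.Chars.strip t).length < (PySem.Chars.strip (s ++ '\n' :: t)).length := by
  obtain ⟨c, u, hcu, hc⟩ := lstrip_exists_head s h
  have hls : PySem.Chars.lstrip (s ++ '\n' :: t) = c :: (u ++ '\n' :: t) := by
    simp only [PySem.Chars.lstrip] at hcu ⊢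
    rw [List.dropWhile_append, hcu]; simp
  have hstep : PySem.Chars.strip (s ++ '\n' :: t)
      = c :: PySem.Chars.rstrip (u ++ '\n' :: t) := by
    unfold PySem.Chars.strip
    rw [hls, rstrip_cons_false _ _ hc]
  rw [hstep, List.length_cons]
  have h1 : (PySem.Chars.strip t).length ≤ (PySem.Chars.rstrip (u ++ '\n' :: t)).length := by
    by_cases ht : PySem.Chars.rstrip t = []
    · have hts : PySem.Chars.strip t = [] := by
        apply all_space_strip_nil
        intro a ha
        have h3 : List.dropWhile PySem.Chars.isspace t.reverse = [] := by
          have := congrArg List.reverse ht; simpa [PySem.Chars.rstrip] using this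
        rw [List.dropWhile_eq_nil_iff] at h3
        exact h3 a (by simpa using ha)
      simp [hts]
    · have he := rstrip_append_ne (u ++ ['\n']) t ht
      rw [show u ++ '\n' :: t = (u ++ ['\n']) ++ t by simp]
      rw [he, List.length_append]
      have := strip_len_le_rstrip t
      omega
  omega

theorem join_append_cons (tw : List (List Char)) (b0 : List Char) (bs : List (List Char))
    (h : tw ≠ []) :
    PySem.Chars.join ['\n'] (tw ++ b0 :: bs)
      = PySem.Chars.join ['\n'] tw ++ '\n' :: PySem.Chars.join ['\n'] (b0 :: bs) := by
  induction tw with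
  | nil => exact absurd rfl h
  | cons a tws ih =>
    rcases tws with _ | ⟨a2, tws2⟩
    · rw [show ([a] ++ b0 :: bs) = a :: b0 :: bs from rfl, PySem.Chars.join_cons_cons]
      simp [PySem.Chars.join, List.intercalate]
    · rw [show ((a :: a2 :: tws2) ++ b0 :: bs) = a :: (a2 :: (tws2 ++ b0 :: bs)) from by simp,
        PySem.Chars.join_cons_cons,
        show (a2 :: (tws2 ++ b0 :: bs)) = (a2 :: tws2) ++ b0 :: bs from by simp,
        ih (by simp), PySem.Chars.join_cons_cons]
      simp

theorem blk_lt (tw b : List (List Char))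
    (h : PySem.Chars.strip (PySem.Chars.join ['\n'] tw) ≠ []) :
    (PySem.Chars.strip (PySem.Chars.join ['\n'] b)).length <
      (PySem.Chars.strip (PySem.Chars.join ['\n'] (tw ++ b))).length := by
  have htw : tw ≠ [] := by rintro rfl; exact h (by decide)
  rcases b with _ | ⟨b0, bs⟩
  · simp only [List.append_nil]
    rw [show PySem.Chars.strip (PySem.Chars.join ['\n'] ([] : List (List Char))) = []
      from by decide]
    simpa [List.length_pos_iff] using h
  · rw [join_append_cons tw b0 bs htw]
    exact strip_len_lt _ _ h

-- ===== VERDICT (by name: the statement is the Claim_ definition above) =====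
theorem split_dialogues_spec : Claim_unchanged_split_dialogues := by
  intro text _ hD
  unfold split_dialogues split_dialogues_alt
  have h := aLoop_none (PySem.Chars.splitOn text.toList ['\n']) [] []
  simp only [jl, List.map_nil, List.flatten_nil, List.nil_append] at h
  rw [h]
  cases hdw : (PySem.Chars.splitOn text.toList ['\n']).dropWhile
      (fun l => !PySem.Chars.strIsdigit l) with
  | nil => simp [hdw, popTrailingEmpty]
  | cons n rest =>
    have hws : PySem.Chars.strip (PySem.Chars.join ['\n']
        ((PySem.Chars.splitOn text.toList ['\n']).takeWhile
          (fun l => !PySem.Chars.strIsdigit l))) = [] := by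
      by_contra hne
      exact hD (D_of_strip_ne text (by rw [hdw]; simp) hne)
    simp only [hdw, List.nil_append]
    rw [aGo_eq_popB rest.length rest le_rfl n _ hws]


theorem split_dialogues_changed : Claim_changed_split_dialogues := by
  unfold Claim_changed_split_dialogues
  refine ⟨by decide, by decide, by decide, ?_, by decide⟩
  show split_dialogues_alt "a\n1\nb" = [("1", "b")]
  unfold split_dialogues_alt
  rw [show (PySem.Chars.splitOn ("a\n1\nb").toList ['\n']).dropWhile
      (fun l => !PySem.Chars.strIsdigit l) = [['1'], ['b']] from by decide]
  show List.map (fun p => (String.mk p.1, String.mk p.2))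
      (popTrailingEmpty (bGo ['1'] [['b']])) = [("1", "b")]
  rw [bGo_eq_nil _ _ (by decide)]
  decide

theorem split_dialogues_tight : Claim_exact_split_dialogues := by
  intro text _ hD heq
  unfold split_dialogues split_dialogues_alt at heq
  set lines := PySem.Chars.splitOn text.toList ['\n'] with hlines
  set p : List Char → Bool := fun l => !PySem.Chars.strIsdigit l with hp
  obtain ⟨hidx, hany⟩ := hD
  rw [← hlines] at hidx hany
  have hdw : lines.dropWhile p ≠ [] := by
    rw [List.findIdx_lt_length] at hidx
    obtain ⟨x, hx, hpx⟩ := hidx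
    intro he
    rw [List.dropWhile_eq_nil_iff] at he
    have := he x hx
    simp [hp, hpx] at this
  have hs : PySem.Chars.strip (PySem.Chars.join ['\n'] (lines.takeWhile p)) ≠ [] := by
    rw [take_findIdx_eq_takeWhile, List.any_eq_true] at hany
    obtain ⟨l, hl, hlc⟩ := hany
    rw [List.any_eq_true] at hlc
    obtain ⟨c, hc, hcs⟩ := hlc
    intro he
    have := strip_nil_all_space _ he c (mem_join_of_mem _ _ _ hl hc)
    simp [this] at hcs
  obtain ⟨n0, rest, hdweq⟩ : ∃ n0 rest, lines.dropWhile p = n0 :: rest := by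
    rcases h' : lines.dropWhile p with _ | ⟨n0, r⟩
    · exact absurd h' hdw
    · exact ⟨n0, r, rfl⟩
  have hA := aLoop_none lines [] []
  simp only [jl, List.map_nil, List.flatten_nil, List.nil_append] at hA
  rw [hA] at heq
  rw [← hp] at heq
  simp only [hdweq, List.nil_append] at heq
  have hlen := blk_lt (lines.takeWhile p) (rest.takeWhile p) hs
  have hne : PySem.Chars.strip (PySem.Chars.join ['\n']
      (lines.takeWhile p ++ rest.takeWhile p)) ≠
      PySem.Chars.strip (PySem.Chars.join ['\n'] (rest.takeWhile p)) := by
    intro he; rw [he] at hlen; omega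
  have hApos : PySem.Chars.strip (PySem.Chars.join ['\n']
      (lines.takeWhile p ++ rest.takeWhile p)) ≠ [] := by
    intro he; rw [he] at hlen; simp at hlen
  cases hdw2 : rest.dropWhile p with
  | nil =>
    rw [aGo_eq_nil _ _ _ hdw2, bGo_eq_nil _ _ hdw2, if_pos hApos] at heq
    by_cases hb : PySem.Chars.strip (PySem.Chars.join ['\n'] (rest.takeWhile p)) = []
    · rw [show popTrailingEmpty [(n0, PySem.Chars.strip (PySem.Chars.join ['\n']
          (rest.takeWhile p)))] = [] from by simp [popTrailingEmpty, hb]] at heq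
      simp at heq
    · rw [show popTrailingEmpty [(n0, PySem.Chars.strip (PySem.Chars.join ['\n']
          (rest.takeWhile p)))] = [(n0, PySem.Chars.strip (PySem.Chars.join ['\n']
          (rest.takeWhile p)))] from by simp [popTrailingEmpty, hb]] at heq
      simp only [List.map_cons, List.map_nil, List.cons.injEq, Prod.mk.injEq] at heq
      exact hne (String.ofList_inj.mp heq.1.2)
  | cons n2 rs =>
    rw [aGo_eq_cons _ _ _ _ _ hdw2, bGo_eq_cons _ _ _ _ hdw2,
      popTrailingEmpty_cons _ _ (bGo_ne_nil _ _)] at heq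
    simp only [List.map_cons, List.cons.injEq, Prod.mk.injEq] at heq
    exact hne (String.ofList_inj.mp heq.1.2)
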